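-- pv_equiv track=rewrite | github.com/pypi-data/pypi-mirror-403 | packages/gutenfetchen/gutenfetchen-1.2.0-py3-none-any.whl/gutenfetchen/cleaner.py | _strip_ebook_usage_notice
-- ===== SOURCE A (Python) =====
-- def _strip_ebook_usage_notice(lines: list[str]) -> list[str]:
--     """Remove the Gutenberg eBook usage/license notice block.
--
--     Detects a paragraph starting with 'This eBook is for the use of anyone
--     anywhere' and removes it through the end of that paragraph (next blank
--     line or end of file).
--     """
--     trigger = "this ebook is for the use of anyone anywhere"
--     for i, line in enumerate(lines):
--         if line.strip().lower().startswith(trigger):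
--             # Find end of paragraph (next blank line or EOF)
--             end = i + 1
--             while end < len(lines) and lines[end].strip():
--                 end += 1
--             return lines[:i] + lines[end:]
--     return lines
-- ===== SOURCE B (Python) =====
-- def _strip_ebook_usage_notice(lines: list[str]) -> list[str]:
--     """Remove the Gutenberg eBook usage/license notice block.
--
--     Single-pass state machine: once the trigger line is seen (first time only),
--     drop lines until the next blank line, which is kept.
--     """
--     trigger = "this ebook is for the use of anyone anywhere"
--     out = []
--     skipping = False
--     done = False
--     for line in lines:
--         if skipping:
--             if line.strip():
--                 continue
--             skipping = False
--             out.append(line)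
--         elif not done and line.strip().lower().startswith(trigger):
--             skipping = True
--             done = True
--         else:
--             out.append(line)
--     return out
-- ===== Notes on version B (the rewrite author's own statement) =====
-- stated objective: alternative
-- what changed: Replaces A's find-the-trigger-index + inner while loop + list-slice concatenation with a single forward pass maintaining skipping/done flags that drops the notice paragraph as it streams the lines.
import Mathlib
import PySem

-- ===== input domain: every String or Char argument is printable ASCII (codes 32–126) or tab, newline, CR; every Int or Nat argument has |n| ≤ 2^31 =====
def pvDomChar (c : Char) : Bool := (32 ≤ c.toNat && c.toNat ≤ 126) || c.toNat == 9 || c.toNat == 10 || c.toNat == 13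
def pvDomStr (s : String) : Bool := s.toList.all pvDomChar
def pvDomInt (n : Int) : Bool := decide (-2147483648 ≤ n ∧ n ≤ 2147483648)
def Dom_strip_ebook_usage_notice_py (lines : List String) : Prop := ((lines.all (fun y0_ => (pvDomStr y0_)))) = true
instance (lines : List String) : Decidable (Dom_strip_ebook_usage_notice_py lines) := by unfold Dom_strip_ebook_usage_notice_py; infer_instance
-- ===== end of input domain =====

-- B replaces A's index search + while loop + slicing by one streaming pass with two flags; same cost, different decomposition.

def pvTrigger : String := "this ebook is for the use of anyone anywhere"

-- ===== PORT A =====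
-- inner while loop: 'while end < len(lines) and lines[end].strip(): end += 1'
def stripA_while (lines : List String) (e : Nat) : Nat :=
  if h : e < lines.length ∧ PySem.Str.strip lines[e]! ≠ "" then
    stripA_while lines (e + 1)
  else e
termination_by lines.length - e
decreasing_by omega

-- the 'for i, line in enumerate(lines)' loop with early return
def stripA_go (lines : List String) : List String → Nat → List String
  | [], _ => lines
  | line :: rest, i =>
    if PySem.Str.startswith (PySem.Str.lower (PySem.Str.strip line)) pvTrigger then
      let e := stripA_while lines (i + 1)
      -- lines[:i] + lines[end:]
      PySem.List.slice lines none (some (i : Int)) ++ PySem.List.slice lines (some (e : Int)) none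
    else stripA_go lines rest (i + 1)

def strip_ebook_usage_notice_py (lines : List String) : List String :=
  stripA_go lines lines 0

-- ===== PORT B =====
def stripB_go : List String → Bool → Bool → List String
  | [], _, _ => []
  | line :: rest, skipping, done =>
    if skipping then
      if PySem.Str.strip line ≠ "" then stripB_go rest true done
      else line :: stripB_go rest false done
    else if !done && PySem.Str.startswith (PySem.Str.lower (PySem.Str.strip line)) pvTrigger then
      stripB_go rest true true
    else line :: stripB_go rest skipping done

def strip_ebook_usage_notice_py_alt (lines : List String) : List String :=
  stripB_go lines false false

-- ===== PRECONDITION & SPEC =====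
def Spec_strip_ebook_usage_notice_py (lines : List String) (out : List String) : Prop := out = strip_ebook_usage_notice_py_alt lines
instance (lines : List String) (out : List String) : Decidable (Spec_strip_ebook_usage_notice_py lines out) := by unfold Spec_strip_ebook_usage_notice_py; infer_instance

-- ===== CLAIM (what is proved, stated in full; the proofs are below) =====
def Claim_equal_strip_ebook_usage_notice_py : Prop := ∀ (lines : List String), Dom_strip_ebook_usage_notice_py lines → Spec_strip_ebook_usage_notice_py lines (strip_ebook_usage_notice_py lines)

-- ===== LEMMAS AND PROOFS =====

-- once the paragraph is over (skipping off, done on), B copies the rest unchanged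
theorem stripB_done (rest : List String) : stripB_go rest false true = rest := by
  induction rest with
  | nil => rfl
  | cons l rs ih => simp [stripB_go, ih]

-- while skipping, B drops up to (not including) the first blank line
theorem stripB_skip (rest : List String) :
    stripB_go rest true true = rest.dropWhile (fun l => PySem.Str.strip l != "") := by
  induction rest with
  | nil => rfl
  | cons l rs ih =>
    by_cases h : PySem.Str.strip l ≠ ""
    · have hb : (PySem.Str.strip l != "") = true := by simp [bne_iff_ne, h]
      simp [stripB_go, h, List.dropWhile, hb, ih]
    · simp at h
      simp [stripB_go, h, List.dropWhile, stripB_done]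

-- A's while loop lands exactly past the nonblank run
theorem stripA_while_drop (lines : List String) (j : Nat) :
    lines.drop (stripA_while lines j) = (lines.drop j).dropWhile (fun l => PySem.Str.strip l != "") := by
  fun_induction stripA_while lines j with
  | case1 e h ih =>
    have hb : (PySem.Str.strip lines[e] != "") = true := by
      have h2 := h.2
      rw [getElem!_pos lines e h.1] at h2
      simp [bne_iff_ne, h2]
    rw [ih, List.drop_eq_getElem_cons h.1]
    simp [List.dropWhile, hb]
  | case2 e h =>
    by_cases he : e < lines.length
    · have h2 : PySem.Str.strip lines[e]! = "" := by
        by_contra hne; exact h ⟨he, hne⟩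
      rw [getElem!_pos lines e he] at h2
      have hb : (PySem.Str.strip lines[e] != "") = false := by simp [h2]
      rw [List.drop_eq_getElem_cons he]
      simp [List.dropWhile, hb]
    · rw [List.drop_eq_nil_of_le (by omega)]
      simp

theorem stripA_main (rest pre : List String)
    (hpre : ∀ l ∈ pre, PySem.Str.startswith (PySem.Str.lower (PySem.Str.strip l)) pvTrigger = false) :
    stripA_go (pre ++ rest) rest pre.length = pre ++ stripB_go rest false false := by
  induction rest generalizing pre with
  | nil => simp [stripA_go, stripB_go]
  | cons line rs ih =>
    by_cases hc : PySem.Str.startswith (PySem.Str.lower (PySem.Str.strip line)) pvTrigger = true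
    · rw [stripA_go]
      simp only [hc, if_true]
      rw [PySem.List.slice_to_natCast, PySem.List.slice_from_natCast,
          stripA_while_drop, List.take_left]
      have hdrop : (pre ++ line :: rs).drop (pre.length + 1) = rs := by
        rw [show pre ++ line :: rs = (pre ++ [line]) ++ rs by simp,
            show pre.length + 1 = (pre ++ [line]).length by simp, List.drop_left]
      rw [hdrop]
      have hB : stripB_go (line :: rs) false false = stripB_go rs true true := by
        simp only [stripB_go, hc]; simp
      rw [hB, stripB_skip]
    · simp only [Bool.not_eq_true] at hc
      rw [stripA_go]
      simp only [hc, Bool.false_eq_true, if_false]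
      have hB : stripB_go (line :: rs) false false = line :: stripB_go rs false false := by
        simp only [stripB_go, hc]; simp
      rw [hB, show pre ++ line :: rs = (pre ++ [line]) ++ rs by simp,
          show pre.length + 1 = (pre ++ [line]).length by simp]
      rw [ih (pre ++ [line]) (by
        intro l hl
        rcases List.mem_append.1 hl with hm | hm
        · exact hpre l hm
        · simp at hm; subst hm; exact hc)]
      simp

-- ===== VERDICT (by name: the statement is the Claim_ definition above) =====
theorem strip_ebook_usage_notice_py_spec : Claim_equal_strip_ebook_usage_notice_py := by
  intro lines _
  unfold Spec_strip_ebook_usage_notice_py strip_ebook_usage_notice_py strip_ebook_usage_notice_py_alt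
  have := stripA_main lines [] (by simp)
  simpa using this
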